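-- pv_equiv track=rewrite | github.com/Acidastro/Registration-class-example | class Registration.py | is_include_all_register
-- ===== SOURCE A (Python) =====
-- from string import ascii_uppercase
--
-- def is_include_all_register(n):
--     count = 0
--     for upp in ascii_uppercase:
--         if upp in n:
--             count += 1
--             if count == 2:
--                 return True
--     return False
-- ===== SOURCE B (Python) =====
-- from string import ascii_uppercase
--
-- def is_include_all_register(n):
--     seen = set()
--     for c in n:
--         if c in ascii_uppercase:
--             seen.add(c)
--             if len(seen) == 2:
--                 return True
--     return False
-- ===== Notes on version B (the rewrite author's own statement) =====
-- stated objective: alternative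
-- what changed: B makes a single pass over the input string, maintaining a set of distinct ASCII-uppercase letters seen and returning True when it reaches size 2, instead of scanning the 26-letter alphabet and doing a substring search in n for each letter.
import Mathlib
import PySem

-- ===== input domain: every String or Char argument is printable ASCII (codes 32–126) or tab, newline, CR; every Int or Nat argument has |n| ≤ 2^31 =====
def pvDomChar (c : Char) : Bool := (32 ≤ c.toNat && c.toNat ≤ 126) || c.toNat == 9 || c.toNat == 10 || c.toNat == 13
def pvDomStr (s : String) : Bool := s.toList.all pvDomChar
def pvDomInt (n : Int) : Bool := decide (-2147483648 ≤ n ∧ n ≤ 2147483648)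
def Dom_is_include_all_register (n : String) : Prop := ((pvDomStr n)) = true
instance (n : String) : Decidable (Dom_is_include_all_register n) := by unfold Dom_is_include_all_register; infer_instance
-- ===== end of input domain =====

-- B changes the traversal: one pass over n maintaining a set of distinct uppercase letters
-- seen, instead of A's scan over the 26-letter alphabet with a substring search per letter.

-- string.ascii_uppercase
def pvUpper : List Char :=
  ['A','B','C','D','E','F','G','H','I','J','K','L','M',
   'N','O','P','Q','R','S','T','U','V','W','X','Y','Z']

-- ===== PORT A =====
-- the 'for upp in ascii_uppercase' loop with the running count and early return
def pvALoop : List Char → Int → List Char → Bool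
  | [], _, _ => false
  | upp :: rest, count, s =>
    if upp ∈ s then
      let count := count + 1
      if count = 2 then true else pvALoop rest count s
    else pvALoop rest count s

def is_include_all_register (n : String) : Bool := pvALoop pvUpper 0 n.toList

-- ===== PORT B =====
-- the 'for c in n' loop with the growing set 'seen' and early return
def pvBLoop : List Char → PySem.Set Char → Bool
  | [], _ => false
  | c :: rest, seen =>
    if c ∈ pvUpper then
      let seen := PySem.Set.add seen c
      if PySem.List.len seen = 2 then true else pvBLoop rest seen
    else pvBLoop rest seen

def is_include_all_register_alt (n : String) : Bool := pvBLoop n.toList PySem.Set.empty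

-- ===== PRECONDITION & SPEC =====
def Spec_is_include_all_register (n : String) (out : Bool) : Prop := out = is_include_all_register_alt n
instance (n : String) (out : Bool) : Decidable (Spec_is_include_all_register n out) := by unfold Spec_is_include_all_register; infer_instance

-- ===== CLAIM (what is proved, stated in full; the proofs are below) =====
def Claim_equal_is_include_all_register : Prop := ∀ (n : String), Dom_is_include_all_register n → Spec_is_include_all_register n (is_include_all_register n)

-- ===== LEMMAS AND PROOFS =====

-- the final value of B's set after consuming all of chars (no early exit)
def pvBFinal (chars : List Char) (seen : PySem.Set Char) : PySem.Set Char :=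
  chars.foldl (fun s c => if c ∈ pvUpper then PySem.Set.add s c else s) seen

theorem pvUpper_nodup : pvUpper.Nodup := by decide

theorem pvBFinal_cons (c : Char) (rest : List Char) (s : PySem.Set Char) :
    pvBFinal (c :: rest) s = pvBFinal rest (if c ∈ pvUpper then PySem.Set.add s c else s) := rfl

theorem length_le_length_add (s : PySem.Set Char) (c : Char) :
    s.length ≤ (PySem.Set.add s c).length := by
  rw [PySem.Set.add_eq_ite]
  split <;> simp

theorem length_add_le (s : PySem.Set Char) (c : Char) :
    (PySem.Set.add s c).length ≤ s.length + 1 := by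
  rw [PySem.Set.add_eq_ite]
  split <;> simp

theorem length_le_pvBFinal (chars : List Char) (s : PySem.Set Char) :
    s.length ≤ (pvBFinal chars s).length := by
  induction chars generalizing s with
  | nil => simp [pvBFinal]
  | cons c rest ih =>
    rw [pvBFinal_cons]
    split
    · exact le_trans (length_le_length_add s c) (ih _)
    · exact ih s

theorem mem_pvBFinal (chars : List Char) (s : PySem.Set Char) (x : Char) :
    x ∈ pvBFinal chars s ↔ x ∈ s ∨ (x ∈ chars ∧ x ∈ pvUpper) := by
  induction chars generalizing s with
  | nil => simp [pvBFinal]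
  | cons c rest ih =>
    rw [pvBFinal_cons]
    split
    · rw [ih]
      simp only [PySem.Set.mem_add, List.mem_cons]
      constructor
      · rintro ((h | rfl) | ⟨h1, h2⟩)
        · exact Or.inl h
        · exact Or.inr ⟨Or.inl rfl, by assumption⟩
        · exact Or.inr ⟨Or.inr h1, h2⟩
      · rintro (h | ⟨(rfl | h1), h2⟩)
        · exact Or.inl (Or.inl h)
        · exact Or.inl (Or.inr rfl)
        · exact Or.inr ⟨h1, h2⟩
    · rw [ih]
      simp only [List.mem_cons]
      constructor
      · rintro (h | ⟨h1, h2⟩)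
        · exact Or.inl h
        · exact Or.inr ⟨Or.inr h1, h2⟩
      · rintro (h | ⟨(rfl | h1), h2⟩)
        · exact Or.inl h
        · exact absurd h2 (by assumption)
        · exact Or.inr ⟨h1, h2⟩

theorem nodup_pvBFinal (chars : List Char) (s : PySem.Set Char) (hs : s.Nodup) :
    (pvBFinal chars s).Nodup := by
  induction chars generalizing s with
  | nil => simpa [pvBFinal]
  | cons c rest ih =>
    rw [pvBFinal_cons]
    split
    · exact ih _ (PySem.Set.nodup_add s c hs)
    · exact ih _ hs

-- A's loop returns true iff the running count plus the remaining hits reaches 2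
theorem pvALoop_iff (rest : List Char) (count : Int) (s : List Char)
    (h0 : 0 ≤ count) (h1 : count ≤ 1) :
    pvALoop rest count s = true ↔
      2 ≤ count + ((rest.filter (fun u => decide (u ∈ s))).length : Int) := by
  induction rest generalizing count with
  | nil => simp [pvALoop]; omega
  | cons upp rest ih =>
    simp only [pvALoop]
    by_cases hmem : upp ∈ s
    · simp only [List.filter_cons, hmem, decide_true, if_pos]
      by_cases hc : count + 1 = 2
      · simp only [if_pos hc, List.length_cons]
        constructor
        · intro _; push_cast; omega
        · intro _; trivial
      · rw [if_neg hc, ih (count + 1) (by omega) (by omega)]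
        simp only [List.length_cons]
        push_cast
        omega
    · simp only [if_neg hmem]
      simp only [List.filter_cons, hmem, decide_false]
      exact ih count h0 h1

-- B's loop returns true iff the fully-grown set reaches size 2
theorem pvBLoop_iff (chars : List Char) (seen : PySem.Set Char)
    (hn : seen.Nodup) (h1 : seen.length ≤ 1) :
    pvBLoop chars seen = true ↔ 2 ≤ (pvBFinal chars seen).length := by
  induction chars generalizing seen with
  | nil => simp [pvBLoop, pvBFinal]; omega
  | cons c rest ih =>
    simp only [pvBLoop]
    by_cases hc : c ∈ pvUpper
    · simp only [if_pos hc]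
      rw [pvBFinal_cons, if_pos hc]
      by_cases h2 : PySem.List.len (PySem.Set.add seen c) = 2
      · rw [if_pos h2]
        rw [PySem.List.len_eq] at h2
        have := length_le_pvBFinal rest (PySem.Set.add seen c)
        constructor
        · intro _; omega
        · intro _; rfl
      · rw [if_neg h2]
        rw [PySem.List.len_eq] at h2
        have hle := length_add_le seen c
        exact ih (PySem.Set.add seen c) (PySem.Set.nodup_add seen c hn) (by omega)
    · simp only [if_neg hc]
      rw [pvBFinal_cons, if_neg hc]
      exact ih seen hn h1

-- the two counts coincide: both lists are nodup with the same members
theorem counts_eq (n : String) :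
    (pvUpper.filter (fun u => decide (u ∈ n.toList))).length
      = (pvBFinal n.toList PySem.Set.empty).length := by
  have hperm : (pvUpper.filter (fun u => decide (u ∈ n.toList))).Perm
      (pvBFinal n.toList PySem.Set.empty) := by
    rw [List.perm_ext_iff_of_nodup (pvUpper_nodup.filter _)
      (nodup_pvBFinal n.toList PySem.Set.empty List.nodup_nil)]
    intro x
    rw [List.mem_filter, mem_pvBFinal]
    simp [PySem.Set.empty, and_comm]
  exact hperm.length_eq

-- ===== VERDICT (by name: the statement is the Claim_ definition above) =====
theorem is_include_all_register_spec : Claim_equal_is_include_all_register := by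
  intro n _
  unfold Spec_is_include_all_register is_include_all_register is_include_all_register_alt
  have hA := pvALoop_iff pvUpper 0 n.toList (by omega) (by omega)
  have hB := pvBLoop_iff n.toList PySem.Set.empty List.nodup_nil (by simp [PySem.Set.empty])
  have hc := counts_eq n
  rw [zero_add] at hA
  cases hb : pvBLoop n.toList PySem.Set.empty with
  | true =>
    apply hA.mpr
    rw [hc]
    exact_mod_cast hB.mp hb
  | false =>
    by_contra h
    simp only [Bool.not_eq_false] at h
    have h2 := hA.mp h
    rw [hc] at h2
    have h3 : 2 ≤ (pvBFinal n.toList PySem.Set.empty).length := by exact_mod_cast h2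
    exact absurd (hB.mpr h3) (by rw [hb]; simp)
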